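-- pv_equiv track=rewrite | github.com/lizfischer/speedSimulation | _old.py | make_piles
-- ===== SOURCE A (Python) =====
-- def make_piles(cards, n_piles):
--     piles = [[] for _ in range(n_piles + 1)]  # init blank piles, one extra to hold jokers
--     for i in range(1, n_piles + 1):
--         for j in range(i, len(piles)):
--             if cards:
--                 piles[j].append(cards.pop(0))
--             else:
--                 return piles, cards
--     return piles, cards
-- ===== SOURCE B (Python) =====
-- def _round_start(i, n_piles):
--     # Deck index of the first card dealt in round i (closed form: rounds
--     # 1..i-1 deal (n_piles+1-1) + ... + (n_piles+1-(i-1)) cards).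
--     return (i - 1) * (n_piles + 1) - (i - 1) * i // 2
--
--
-- def make_piles(cards, n_piles):
--     # Closed-form dealing: pile j receives the cards sitting at deck indices
--     # _round_start(i, n_piles) + (j - i) for rounds i = 1..j; no sequential
--     # popping.  Only the first `rounds` rounds deal any card, which bounds the
--     # inner loop.  Mutates cards in place to the undealt tail, like the original.
--     m = len(cards)
--     rounds = 0
--     while rounds < n_piles and _round_start(rounds + 1, n_piles) < m:
--         rounds += 1
--     piles = []
--     for j in range(n_piles + 1):
--         pile = []
--         for i in range(1, min(j, rounds) + 1):
--             s = _round_start(i, n_piles) + j - i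
--             if s < m:
--                 pile.append(cards[s])
--         piles.append(pile)
--     total = n_piles * (n_piles + 1) // 2 if n_piles > 0 else 0
--     cards[:] = cards[min(m, total):]
--     return piles, cards
-- ===== Notes on version B (the rewrite author's own statement) =====
-- stated objective: faster
-- what changed: Replaces the sequential nested-loop deal with repeated cards.pop(0) and an early return by a closed-form computation: each pile j directly gathers the cards at deck indices round_start(i)+j-i for i=1..j, and the leftover tail is one slice cards[min(m, n*(n+1)//2):].
import Mathlib
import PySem

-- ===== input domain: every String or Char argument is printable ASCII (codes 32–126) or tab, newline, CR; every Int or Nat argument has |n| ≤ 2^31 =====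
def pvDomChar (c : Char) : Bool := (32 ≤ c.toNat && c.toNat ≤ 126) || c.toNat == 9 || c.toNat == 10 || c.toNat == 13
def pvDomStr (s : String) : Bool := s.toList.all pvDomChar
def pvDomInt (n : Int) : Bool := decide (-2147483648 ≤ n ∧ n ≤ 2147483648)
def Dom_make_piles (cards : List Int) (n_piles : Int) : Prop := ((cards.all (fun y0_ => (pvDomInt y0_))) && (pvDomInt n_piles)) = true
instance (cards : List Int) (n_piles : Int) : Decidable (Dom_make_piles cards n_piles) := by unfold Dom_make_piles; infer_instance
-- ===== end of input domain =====

-- B replaces A's sequential pop(0) deal (quadratic in the dealt cards) with a closed-form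
-- per-pile index computation and one final slice; both Pythons mutate `cards` in place to the
-- same undealt tail, and the equivalence proved here is about the RETURN value.

-- ===== PORT A =====
-- inner 'for j in range(i, len(piles))' loop; the Bool records the early 'return piles, cards'
-- (taken only when cards == [], so the returned cards there is []).
-- j comes from range(i, len(piles)), so 0 ≤ j < len(piles): piles[j].append(c) is exactly
-- set j.toNat (getD j.toNat [] ++ [c]) here.
def mpInner : List Int → List (List Int) → List Int → List (List Int) × List Int × Bool
  | [], piles, cards => (piles, cards, false)
  | j :: js, piles, cards =>
      match cards with
      | [] => (piles, [], true)
      | c :: rest => mpInner js (piles.set j.toNat ((piles.getD j.toNat []) ++ [c])) rest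

-- outer 'for i in range(1, n_piles + 1)' loop
def mpOuter : List Int → List (List Int) → List Int → List (List Int) × List Int
  | [], piles, cards => (piles, cards)
  | i :: is, piles, cards =>
      match mpInner (PySem.List.pyRange i (piles.length : Int) 1) piles cards with
      | (piles', cards', true) => (piles', cards')
      | (piles', cards', false) => mpOuter is piles' cards'

def make_piles (cards : List Int) (n_piles : Int) : List (List Int) × List Int :=
  let piles := (PySem.List.pyRange 0 (n_piles + 1) 1).map (fun _ => ([] : List Int))
  mpOuter (PySem.List.pyRange 1 (n_piles + 1) 1) piles cards

-- ===== PORT B =====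
-- Source B's _round_start
def roundStart (i n_piles : Int) : Int :=
  (i - 1) * (n_piles + 1) - PySem.Int.floordiv ((i - 1) * i) 2

-- Source B's while loop computing `rounds` (the number of rounds that deal at least one card)
def roundsGo (m n_piles R : Int) : Int :=
  if h : R < n_piles ∧ roundStart (R + 1) n_piles < m then roundsGo m n_piles (R + 1) else R
termination_by (n_piles - R).toNat
decreasing_by omega

def make_piles_alt (cards : List Int) (n_piles : Int) : List (List Int) × List Int :=
  let m : Int := cards.length
  let rounds : Int := roundsGo m n_piles 0
  let piles := (PySem.List.pyRange 0 (n_piles + 1) 1).map (fun j =>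
    (PySem.List.pyRange 1 (min j rounds + 1) 1).filterMap (fun i =>
      let s := roundStart i n_piles + j - i
      if s < m then PySem.List.pyGet? cards s else none))
  let total : Int := if n_piles > 0 then PySem.Int.floordiv (n_piles * (n_piles + 1)) 2 else 0
  (piles, PySem.List.slice cards (some (min m total)) none)

-- ===== PRECONDITION & SPEC =====
def Spec_make_piles (cards : List Int) (n_piles : Int) (out : List (List Int) × List Int) : Prop := out = make_piles_alt cards n_piles
instance (cards : List Int) (n_piles : Int) (out : List (List Int) × List Int) : Decidable (Spec_make_piles cards n_piles out) := by unfold Spec_make_piles; infer_instance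

-- ===== CLAIM (what is proved, stated in full; the proofs are below) =====
def Claim_equal_make_piles : Prop := ∀ (cards : List Int) (n_piles : Int), Dom_make_piles cards n_piles → Spec_make_piles cards n_piles (make_piles cards n_piles)

-- ===== LEMMAS AND PROOFS =====

-- number of cards dealt by the complete rounds 1..r (round i deals Np+1-i cards)
def Dn (Np : Nat) : Nat → Nat
  | 0 => 0
  | r + 1 => Dn Np r + (Np - r)

-- pile j of the final result: one card per round t+1 = 1..j, at deck index Dn t + (j - (t+1))
def pileFin (c0 : List Int) (Np j : Nat) : List Int :=
  (List.range j).filterMap (fun t => c0[Dn Np t + (j - (t + 1))]?)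

def pilesFin (c0 : List Int) (Np : Nat) : List (List Int) :=
  (List.range (Np + 1)).map (pileFin c0 Np)

-- pile j in mid-run: rounds 1..r complete, round r+1 dealt to piles (r+1)..(bound-1)
def pileMid (c0 : List Int) (Np r bound j : Nat) : List Int :=
  (List.range (if j < bound then min (r + 1) j else min r j)).filterMap
    (fun t => c0[Dn Np t + (j - (t + 1))]?)

def pilesMid (c0 : List Int) (Np r bound : Nat) : List (List Int) :=
  (List.range (Np + 1)).map (pileMid c0 Np r bound)

theorem Dn_mono (Np : Nat) {r t : Nat} (h : r ≤ t) : Dn Np r ≤ Dn Np t := by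
  induction t with
  | zero =>
      have hr : r = 0 := by omega
      subst hr; exact le_rfl
  | succ t ih =>
      rcases Nat.lt_or_ge r (t + 1) with h' | h'
      · refine le_trans (ih (by omega)) ?_
        simp only [Dn]
        exact Nat.le_add_right _ _
      · have hr : r = t + 1 := by omega
        subst hr; exact le_rfl

theorem Dn_cast (Np t : Nat) (ht : t ≤ Np) :
    (2 * Dn Np t : Int) = 2 * t * Np + t - t * t := by
  induction t with
  | zero => simp [Dn]
  | succ t ih =>
      have ih2 := ih (by omega)
      have hstep : ((Dn Np (t + 1) : Nat) : Int) = (Dn Np t : Int) + ((Np : Int) - t) := by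
        simp only [Dn]; omega
      push_cast
      rw [hstep]
      linear_combination ih2

theorem length_pilesMid (c0 : List Int) (Np r bound : Nat) :
    (pilesMid c0 Np r bound).length = Np + 1 := by
  simp [pilesMid]

theorem filterMap_range_stable {α : Type} (f : Nat → Option α) {a b : Nat} (hab : a ≤ b)
    (h : ∀ t, a ≤ t → t < b → f t = none) :
    (List.range b).filterMap f = (List.range a).filterMap f := by
  obtain ⟨k, rfl⟩ := Nat.exists_eq_add_of_le hab
  rw [List.range_add, List.filterMap_append]
  have : (List.map (a + ·) (List.range k)).filterMap f = [] := by
    rw [List.filterMap_map, List.filterMap_eq_nil_iff]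
    intro t ht
    simp only [List.mem_range] at ht
    simpa using h (a + t) (Nat.le_add_right a t) (by omega)
  simp [this]

-- mid-state with r complete rounds and all of round r+1 = start of round r+2
theorem pilesMid_roll (c0 : List Int) (Np r : Nat) :
    pilesMid c0 Np r (Np + 1) = pilesMid c0 Np (r + 1) (r + 2) := by
  unfold pilesMid
  refine List.map_congr_left ?_
  intro j hj
  simp only [List.mem_range] at hj
  unfold pileMid
  congr 1
  congr 1
  split_ifs <;> omega

-- dealing one more card moves the mid-state one slot forward
theorem pilesMid_step (c0 : List Int) (Np r jn : Nat) (hr : r < Np) (hj1 : r + 1 ≤ jn)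
    (hj2 : jn ≤ Np) (hs : Dn Np r + (jn - (r + 1)) < c0.length) :
    (pilesMid c0 Np r jn).set jn
        (pileMid c0 Np r jn jn ++ [c0[Dn Np r + (jn - (r + 1))]'hs]) =
      pilesMid c0 Np r (jn + 1) := by
  apply List.ext_getElem
  · simp [pilesMid]
  intro q hq1 hq2
  simp only [List.length_set, length_pilesMid] at hq1
  rw [List.getElem_set]
  simp only [pilesMid, List.getElem_map, List.getElem_range]
  by_cases hqj : jn = q
  · rw [if_pos hqj]
    subst hqj
    unfold pileMid
    rw [if_neg (by omega : ¬ jn < jn), if_pos (by omega : jn < jn + 1)]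
    rw [(by omega : min r jn = r), (by omega : min (r + 1) jn = r + 1)]
    rw [List.range_succ, List.filterMap_append]
    simp only [List.filterMap_cons, List.filterMap_nil]
    rw [List.getElem?_eq_getElem hs]
  · rw [if_neg hqj]
    unfold pileMid
    congr 1
    congr 1
    split_ifs <;> omega

-- once the deck is exhausted, the mid-state already is the final pile layout
theorem pilesMid_eq_fin (c0 : List Int) (Np r jn : Nat) (hr : r < Np) (hj1 : r + 1 ≤ jn)
    (hj2 : jn ≤ Np + 1) (hm : c0.length ≤ Dn Np r + (jn - (r + 1))) :
    pilesMid c0 Np r jn = pilesFin c0 Np := by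
  unfold pilesMid pilesFin
  refine List.map_congr_left ?_
  intro j hj
  simp only [List.mem_range] at hj
  unfold pileMid pileFin
  refine (filterMap_range_stable _ ?_ ?_).symm
  · split_ifs <;> omega
  · intro t ht1 ht2
    apply List.getElem?_eq_none
    rcases Nat.lt_or_ge t (r + 1) with htr | htr
    · -- only t = r with j ≥ jn is possible here
      by_cases hjlt : j < jn
      · rw [if_pos hjlt] at ht1
        omega
      · rw [if_neg hjlt] at ht1
        have hte : t = r := by omega
        subst hte
        omega
    · -- t ≥ r+1 : Dn t ≥ Dn (r+1) = Dn r + (Np - r) ≥ the exhaustion point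
      have hd2 : Dn Np r + (Np - r) ≤ Dn Np t := by
        have h3 := Dn_mono Np htr
        simpa [Dn] using h3
      omega

theorem inner_go (c0 : List Int) (Np : Nat) :
    ∀ (L r jn : Nat), r < Np → r + 1 ≤ jn → jn + L = Np + 1 →
    mpInner (PySem.List.pyRange (jn : Int) ((Np + 1 : Nat) : Int) 1)
        (pilesMid c0 Np r jn) (c0.drop (Dn Np r + (jn - (r + 1)))) =
      if c0.length < Dn Np (r + 1) ∧ jn ≤ Np then (pilesFin c0 Np, [], true)
      else (pilesMid c0 Np r (Np + 1), c0.drop (Dn Np (r + 1)), false) := by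
  intro L
  induction L with
  | zero =>
      intro r jn hr hj1 hjL
      have hjn : jn = Np + 1 := by omega
      subst hjn
      rw [PySem.List.pyRange_one_eq_nil le_rfl]
      simp only [mpInner]
      rw [if_neg (by omega : ¬(c0.length < Dn Np (r + 1) ∧ Np + 1 ≤ Np))]
      have hD : Dn Np r + (Np + 1 - (r + 1)) = Dn Np (r + 1) := by
        simp only [Dn]; omega
      rw [hD]
  | succ L ih =>
      intro r jn hr hj1 hjL
      have hjn : jn ≤ Np := by omega
      have hDsucc : Dn Np (r + 1) = Dn Np r + (Np - r) := by simp only [Dn]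
      rw [PySem.List.pyRange_one_cons (by exact_mod_cast (by omega : jn < Np + 1))]
      rcases Nat.lt_or_ge (Dn Np r + (jn - (r + 1))) c0.length with hsm | hsm
      · -- a card is available: deal it to pile jn and move on
        rw [← List.getElem_cons_drop hsm]
        simp only [mpInner, Int.toNat_natCast]
        have hget : (pilesMid c0 Np r jn).getD jn [] = pileMid c0 Np r jn jn := by
          rw [List.getD_eq_getElem _ _ (by rw [length_pilesMid]; omega)]
          simp [pilesMid]
        rw [hget, pilesMid_step c0 Np r jn hr hj1 hjn hsm]
        rw [show (Dn Np r + (jn - (r + 1))) + 1 = Dn Np r + (jn + 1 - (r + 1)) by omega]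
        rw [show ((jn : Int) + 1) = ((jn + 1 : Nat) : Int) by push_cast; ring]
        rw [ih r (jn + 1) hr (by omega) (by omega)]
        exact if_congr (by omega) rfl rfl
      · -- deck exhausted: early return with the final layout
        rw [List.drop_eq_nil_of_le hsm]
        simp only [mpInner]
        rw [if_pos ⟨by omega, hjn⟩]
        rw [pilesMid_eq_fin c0 Np r jn hr hj1 (by omega) hsm]

theorem outer_go (c0 : List Int) (Np : Nat) :
    ∀ (K r : Nat), r + K = Np →
    mpOuter (PySem.List.pyRange ((r + 1 : Nat) : Int) ((Np + 1 : Nat) : Int) 1)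
        (pilesMid c0 Np r (r + 1)) (c0.drop (Dn Np r)) =
      (pilesFin c0 Np, c0.drop (min c0.length (Dn Np Np))) := by
  intro K
  induction K with
  | zero =>
      intro r hK
      have hr : Np = r := by omega
      subst hr
      rw [PySem.List.pyRange_one_eq_nil le_rfl]
      simp only [mpOuter]
      have hp : pilesMid c0 Np Np (Np + 1) = pilesFin c0 Np := by
        unfold pilesMid pilesFin
        refine List.map_congr_left ?_
        intro j hj
        simp only [List.mem_range] at hj
        unfold pileMid pileFin
        congr 1
        congr 1
        split_ifs
        all_goals omega
      rw [hp]
      rcases Nat.le_total (Dn Np Np) c0.length with h | h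
      · rw [min_eq_right h]
      · rw [min_eq_left h, List.drop_eq_nil_of_le h, List.drop_eq_nil_of_le le_rfl]
  | succ K ih =>
      intro r hK
      have hr : r < Np := by omega
      rw [PySem.List.pyRange_one_cons (by exact_mod_cast (by omega : r + 1 < Np + 1))]
      simp only [mpOuter, length_pilesMid]
      have hin := inner_go c0 Np (Np - r) r (r + 1) hr le_rfl (by omega)
      rw [show Dn Np r + (r + 1 - (r + 1)) = Dn Np r by omega] at hin
      rw [hin]
      by_cases hc : c0.length < Dn Np (r + 1) ∧ r + 1 ≤ Np
      · rw [if_pos hc]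
        have hmin : min c0.length (Dn Np Np) = c0.length :=
          min_eq_left (le_trans (le_of_lt hc.1) (Dn_mono Np (by omega)))
        rw [hmin, List.drop_eq_nil_of_le le_rfl]
      · rw [if_neg hc]
        rw [pilesMid_roll]
        rw [show ((r + 1 : Nat) : Int) + 1 = ((r + 1 + 1 : Nat) : Int) by push_cast; ring]
        exact ih (r + 1) (by omega)

theorem make_piles_nat (c0 : List Int) (Np : Nat) :
    make_piles c0 (Np : Int) = (pilesFin c0 Np, c0.drop (min c0.length (Dn Np Np))) := by
  unfold make_piles
  rw [show ((Np : Int) + 1) = ((Np + 1 : Nat) : Int) by push_cast; ring]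
  have h0 : (PySem.List.pyRange 0 ((Np + 1 : Nat) : Int) 1).map (fun _ => ([] : List Int)) =
      pilesMid c0 Np 0 1 := by
    rw [PySem.List.pyRange_one, List.map_map]
    unfold pilesMid
    simp only [sub_zero, Int.toNat_natCast]
    refine List.map_congr_left ?_
    intro j hj
    simp only [List.mem_range] at hj
    show ([] : List Int) = pileMid c0 Np 0 1 j
    unfold pileMid
    rw [show (if j < 1 then min (0 + 1) j else min 0 j) = 0 from by split_ifs <;> omega]
    rfl
  rw [h0]
  rw [show (1 : Int) = ((0 + 1 : Nat) : Int) by norm_num]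
  have := outer_go c0 Np Np 0 (by omega)
  rw [show Dn Np 0 = 0 from rfl, List.drop_zero] at this
  exact this

theorem roundStart_cast (Np t : Nat) (ht : t ≤ Np) :
    roundStart (1 + (t : Int)) (Np : Int) = ((Dn Np t : Nat) : Int) := by
  unfold roundStart
  rw [show ((1 : Int) + (t : Int) - 1) = (t : Int) by ring]
  rw [PySem.Int.floordiv_eq_ediv_of_pos (by norm_num)]
  have h2 := Dn_cast Np t ht
  rw [show ((t : Int) * ((1 : Int) + (t : Int))) = 2 * ((t : Int) * (Np : Int) + (t : Int) - ((Dn Np t : Nat) : Int)) by linear_combination h2]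
  rw [Int.mul_ediv_cancel_left _ (by norm_num)]
  ring

theorem roundsGo_spec (m n : Int) :
    ∀ (fuel : Nat) (R : Int), 0 ≤ R → R ≤ n → (n - R).toNat = fuel →
    R ≤ roundsGo m n R ∧ roundsGo m n R ≤ n ∧
      (roundsGo m n R < n → ¬ roundStart (roundsGo m n R + 1) n < m) := by
  intro fuel
  induction fuel with
  | zero =>
      intro R h0 h1 h2
      rw [roundsGo, dif_neg (fun hc => absurd hc.1 (by omega))]
      exact ⟨le_rfl, h1, fun h3 => absurd h3 (by omega)⟩
  | succ fuel ih =>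
      intro R h0 h1 h2
      by_cases hc : R < n ∧ roundStart (R + 1) n < m
      · rw [roundsGo, dif_pos hc]
        have h4 := ih (R + 1) (by omega) (by omega) (by omega)
        exact ⟨by omega, h4.2.1, h4.2.2⟩
      · rw [roundsGo, dif_neg hc]
        exact ⟨le_rfl, h1, fun h3 h4 => hc ⟨h3, h4⟩⟩

theorem make_piles_alt_nat (c0 : List Int) (Np : Nat) :
    make_piles_alt c0 (Np : Int) = (pilesFin c0 Np, c0.drop (min c0.length (Dn Np Np))) := by
  unfold make_piles_alt
  have htot : (if (Np : Int) > 0 then PySem.Int.floordiv ((Np : Int) * ((Np : Int) + 1)) 2 else 0) =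
      ((Dn Np Np : Nat) : Int) := by
    rcases Nat.eq_zero_or_pos Np with h | h
    · subst h
      norm_num
    · rw [if_pos (by exact_mod_cast h)]
      rw [PySem.Int.floordiv_eq_ediv_of_pos (by norm_num)]
      have h2 := Dn_cast Np Np le_rfl
      rw [show ((Np : Int) * ((Np : Int) + 1)) = 2 * ((Dn Np Np : Nat) : Int) by linear_combination -h2]
      rw [Int.mul_ediv_cancel_left _ (by norm_num)]
  refine Prod.ext ?_ ?_
  · -- the piles
    show (PySem.List.pyRange 0 ((Np : Int) + 1) 1).map _ = pilesFin c0 Np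
    rw [show ((Np : Int) + 1) = ((Np + 1 : Nat) : Int) by push_cast; ring]
    rw [PySem.List.pyRange_one, List.map_map]
    simp only [sub_zero, Int.toNat_natCast]
    unfold pilesFin
    refine List.map_congr_left ?_
    intro j hj
    simp only [List.mem_range] at hj
    show (PySem.List.pyRange 1 (min ((0 : Int) + (j : Int)) (roundsGo ((c0.length : Nat) : Int) ((Np : Nat) : Int) 0) + 1) 1).filterMap _ = pileFin c0 Np j
    obtain ⟨hR0, hRn, hRm⟩ :=
      roundsGo_spec ((c0.length : Nat) : Int) ((Np : Nat) : Int) (((Np : Nat) : Int) - 0).toNat 0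
        le_rfl (by omega) rfl
    set R : Int := roundsGo ((c0.length : Nat) : Int) ((Np : Nat) : Int) 0 with hRdef
    have hmin : ((min ((0 : Int) + (j : Int)) R + 1) - 1).toNat = min j R.toNat := by omega
    rw [PySem.List.pyRange_one, hmin, List.filterMap_map]
    have hpile : pileFin c0 Np j =
        (List.range (min j R.toNat)).filterMap (fun t => c0[Dn Np t + (j - (t + 1))]?) := by
      unfold pileFin
      refine filterMap_range_stable _ (by omega) ?_
      intro t ht1 ht2
      apply List.getElem?_eq_none
      have htR : R.toNat ≤ t := by omega
      have hRlt : R < ((Np : Nat) : Int) := by omega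
      have hs := hRm hRlt
      rw [show R + 1 = 1 + ((R.toNat : Nat) : Int) by omega] at hs
      rw [roundStart_cast Np R.toNat (by omega)] at hs
      have hDt := Dn_mono Np htR
      omega
    rw [hpile]
    refine List.filterMap_congr ?_
    intro t ht
    simp only [List.mem_range] at ht
    have htj : t < j := by omega
    show (if roundStart (1 + (t : Int)) (Np : Int) + (0 + (j : Int)) - (1 + (t : Int)) < (c0.length : Int)
          then PySem.List.pyGet? c0 (roundStart (1 + (t : Int)) (Np : Int) + (0 + (j : Int)) - (1 + (t : Int)))
          else none) = c0[Dn Np t + (j - (t + 1))]?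
    rw [roundStart_cast Np t (by omega)]
    rw [show ((Dn Np t : Nat) : Int) + (0 + (j : Int)) - (1 + (t : Int)) = ((Dn Np t + (j - (t + 1)) : Nat) : Int) by omega]
    by_cases hlt : Dn Np t + (j - (t + 1)) < c0.length
    · rw [if_pos (by exact_mod_cast hlt), PySem.List.pyGet?_natCast]
    · rw [if_neg (by exact_mod_cast hlt)]
      exact (List.getElem?_eq_none (by omega)).symm
  · -- the leftover tail
    show PySem.List.slice c0 (some (min ((c0.length : Nat) : Int) _)) none = _
    rw [htot]
    rw [show min ((c0.length : Nat) : Int) ((Dn Np Np : Nat) : Int) = ((min c0.length (Dn Np Np) : Nat) : Int) by omega]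
    exact PySem.List.slice_from_natCast c0 _

theorem neg_case (c0 : List Int) (n : Int) (hn : n < 0) :
    make_piles c0 n = make_piles_alt c0 n := by
  unfold make_piles make_piles_alt
  rw [PySem.List.pyRange_one_eq_nil (by omega : n + 1 ≤ 0),
      PySem.List.pyRange_one_eq_nil (by omega : n + 1 ≤ 1)]
  simp only [List.map_nil, mpOuter]
  rw [if_neg (by omega : ¬ n > 0)]
  rw [min_eq_right (by positivity : (0 : Int) ≤ (c0.length : Int))]
  rw [PySem.List.slice_zero_start, PySem.List.slice_none_none]

-- ===== VERDICT (by name: the statement is the Claim_ definition above) =====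
theorem make_piles_spec : Claim_equal_make_piles := by
  intro cards n_piles _
  unfold Spec_make_piles
  rcases Int.lt_or_le n_piles 0 with hn | hn
  · exact neg_case cards n_piles hn
  · obtain ⟨Np, rfl⟩ : ∃ k : Nat, n_piles = (k : Int) := ⟨n_piles.toNat, by omega⟩
    rw [make_piles_nat, make_piles_alt_nat]
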